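-- pv_equiv track=rewrite | github.com/Zhang-snow-shirley/Extreme-Weather-Indicators-Calculation | GSL.py | growing_season_length
-- ===== SOURCE A (Python) =====
-- def growing_season_length(nums, n):
--     start, end = None, None
--     for i in range(len(nums)-5):
--         if all(n > 5 for n in nums[i:i+6]):
--             start = i + 6
--             break
--     if start is None:
--         return 0, 0
--     for i in range(start+len(nums[start:])-5):
--         if all(n < 5 for n in nums[i:i+6]) and i > n:
--             end = i + 5
--             break
--     if end is None:
--         return start, len(nums)
--     else:
--         return start, end
-- ===== SOURCE B (Python) =====
-- def growing_season_length(nums, n):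
--     # Single forward passes with a running count of consecutive qualifying days,
--     # instead of re-scanning a 6-element window at every index.
--     start = None
--     c = 0
--     for j, t in enumerate(nums):
--         c = c + 1 if t > 5 else 0
--         if c >= 6:
--             start = j + 1
--             break
--     if start is None:
--         return 0, 0
--     c = 0
--     for j, t in enumerate(nums):
--         c = c + 1 if t < 5 else 0
--         if c >= 6 and j - 5 > n:
--             return start, j
--     return start, len(nums)
-- ===== Notes on version B (the rewrite author's own statement) =====
-- stated objective: faster
-- what changed: Replaces both fixed-window rescans (a 6-element slice re-checked at every index) with single forward passes that maintain a running count of consecutive qualifying elements, removing the inner window scan and slice allocations.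
import Mathlib
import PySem

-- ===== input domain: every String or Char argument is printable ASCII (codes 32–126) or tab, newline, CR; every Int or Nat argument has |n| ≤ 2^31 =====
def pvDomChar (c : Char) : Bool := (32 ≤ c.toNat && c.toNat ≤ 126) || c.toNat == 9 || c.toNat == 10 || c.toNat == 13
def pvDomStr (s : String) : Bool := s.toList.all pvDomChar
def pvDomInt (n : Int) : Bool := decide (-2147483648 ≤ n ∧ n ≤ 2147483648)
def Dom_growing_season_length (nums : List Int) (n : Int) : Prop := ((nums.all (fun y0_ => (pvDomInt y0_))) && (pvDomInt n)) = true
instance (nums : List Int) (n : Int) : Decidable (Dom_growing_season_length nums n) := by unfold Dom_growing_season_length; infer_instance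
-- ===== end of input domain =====

-- B replaces A's two fixed-window rescans by single forward passes keeping a running
-- count of consecutive qualifying elements (alternative decomposition, same results).

-- ===== PORT A =====
-- one step of a Python 'for ... if ...: x = g(i); break' loop: keep the first hit
def breakStep (P : Int → Bool) (g : Int → Int) (a : Option Int) (i : Int) : Option Int :=
  match a with
  | some v => some v
  | none => if P i then some (g i) else none

def growing_season_length (nums : List Int) (n : Int) : Int × Int :=
  let start? : Option Int :=
    (PySem.List.pyRange 0 ((nums.length : Int) - 5) 1).foldl
      (breakStep (fun i => (PySem.List.slice nums (some i) (some (i + 6))).all (fun m => decide (m > 5)))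
        (fun i => i + 6)) none
  match start? with
  | none => (0, 0)
  | some start =>
    let tail := PySem.List.slice nums (some start) none
    let end? : Option Int :=
      (PySem.List.pyRange 0 (start + (tail.length : Int) - 5) 1).foldl
        (breakStep (fun i => (PySem.List.slice nums (some i) (some (i + 6))).all (fun m => decide (m < 5))
            && decide (i > n))
          (fun i => i + 5)) none
    match end? with
    | none => (start, (nums.length : Int))
    | some e => (start, e)

-- ===== PORT B =====
-- running count of consecutive elements > 5; break (= some) when it reaches 6
def gslStartScan : List Int → Int → Int → Option Int
  | [], _, _ => none
  | t :: rest, j, c =>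
    let c' : Int := if t > 5 then c + 1 else 0
    if 6 ≤ c' then some (j + 1) else gslStartScan rest (j + 1) c'

-- running count of consecutive elements < 5; break when it reaches 6 and j - 5 > n
def gslEndScan (n : Int) : List Int → Int → Int → Option Int
  | [], _, _ => none
  | t :: rest, j, c =>
    let c' : Int := if t < 5 then c + 1 else 0
    if 6 ≤ c' ∧ j - 5 > n then some j else gslEndScan n rest (j + 1) c'

def growing_season_length_alt (nums : List Int) (n : Int) : Int × Int :=
  match gslStartScan nums 0 0 with
  | none => (0, 0)
  | some s =>
    match gslEndScan n nums 0 0 with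
    | none => (s, (nums.length : Int))
    | some e => (s, e)

-- ===== PRECONDITION & SPEC =====
def Spec_growing_season_length (nums : List Int) (n : Int) (out : Int × Int) : Prop := out = growing_season_length_alt nums n
instance (nums : List Int) (n : Int) (out : Int × Int) : Decidable (Spec_growing_season_length nums n out) := by unfold Spec_growing_season_length; infer_instance

-- ===== CLAIM (what is proved, stated in full; the proofs are below) =====
def Claim_equal_growing_season_length : Prop := ∀ (nums : List Int) (n : Int), Dom_growing_season_length nums n → Spec_growing_season_length nums n (growing_season_length nums n)

-- ===== LEMMAS AND PROOFS =====

-- length of the maximal all-p suffix of l (the value of B's running counter)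
def trailRun (p : Int → Bool) (l : List Int) : Nat := (l.reverse.takeWhile p).length

-- B's counter value after consuming s[0..k], having started with credit c
def cntAt (p : Int → Bool) (c : Nat) (s : List Int) (k : Nat) : Nat :=
  if (s.take (k+1)).all p then c + k + 1 else trailRun p (s.take (k+1))

-- A's break-loop as a fold equals find?
theorem foldl_break (l : List Int) (P : Int → Bool) (g : Int → Int) (acc : Option Int) :
    l.foldl (breakStep P g) acc
    = match acc with | some v => some v | none => (l.find? P).map g := by
  induction l generalizing acc with
  | nil => cases acc <;> simp
  | cons x xs ih =>
    cases acc with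
    | some v => simp [List.foldl_cons, breakStep, ih]
    | none =>
      by_cases h : P x = true
      · simp [List.foldl_cons, breakStep, h, ih]
      · simp only [Bool.not_eq_true] at h
        simp [List.foldl_cons, breakStep, h, ih]

theorem find?_range_eq_none (P : Nat → Bool) (N : Nat) :
    (List.range N).find? P = none ↔ ∀ m, m < N → P m = false := by
  simp [List.find?_eq_none, List.mem_range]

theorem find?_range_eq_some (P : Nat → Bool) (N : Nat) : ∀ k,
    (List.range N).find? P = some k ↔ k < N ∧ P k = true ∧ ∀ m, m < k → P m = false := by
  induction N with
  | zero => intro k; simp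
  | succ N ih =>
    intro k
    rw [List.range_succ, List.find?_append]
    rcases hf : (List.range N).find? P with _ | k'
    · have hall := (find?_range_eq_none P N).mp hf
      rw [Option.none_or]
      constructor
      · intro hs
        rcases hs' : P N with _ | _
        · rw [List.find?_cons_of_neg (by simp [hs']), List.find?_nil] at hs
          cases hs
        · rw [List.find?_cons_of_pos hs'] at hs
          injection hs with hs
          subst hs
          exact ⟨by omega, hs', fun m hm => hall m hm⟩
      · rintro ⟨hk, hP, hmin⟩
        have hkN : k = N := by
          by_contra hne
          have hlt : k < N := by omega
          have := hall k hlt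
          rw [hP] at this; cases this
        subst hkN
        rw [List.find?_cons_of_pos hP]
    · rw [Option.some_or]
      rcases (ih k').mp hf with ⟨hk', hP', hmin'⟩
      constructor
      · intro hs
        injection hs with hs
        subst hs
        exact ⟨by omega, hP', hmin'⟩
      · rintro ⟨hk, hP, hmin⟩
        by_cases hlt : k' < k
        · have := hmin k' hlt; rw [hP'] at this; cases this
        · by_cases hgt : k < k'
          · have := hmin' k hgt; rw [hP] at this; cases this
          · have : k = k' := by omega
            simp [this]

theorem find?_congr' {α : Type} (l : List α) (P Q : α → Bool) (h : ∀ x ∈ l, P x = Q x) :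
    l.find? P = l.find? Q := by
  induction l with
  | nil => rfl
  | cons x xs ih =>
    have hx := h x (by simp)
    by_cases hp : P x = true
    · rw [List.find?_cons_of_pos hp, List.find?_cons_of_pos (hx ▸ hp)]
    · simp only [Bool.not_eq_true] at hp
      rw [List.find?_cons_of_neg (by simp [hp]), List.find?_cons_of_neg (by simp [hx ▸ hp]),
        ih (fun y hy => h y (by simp [hy]))]

theorem takeWhile_append_eq (p : Int → Bool) (xs ys : List Int) :
    (xs ++ ys).takeWhile p = if xs.all p then xs ++ ys.takeWhile p else xs.takeWhile p := by
  induction xs with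
  | nil => simp
  | cons x xs ih =>
    by_cases hx : p x = true
    · simp [List.takeWhile_cons, hx, ih]
      split_ifs <;> simp
    · simp only [Bool.not_eq_true] at hx
      simp [List.takeWhile_cons, hx]

theorem trailRun_all (p : Int → Bool) (l : List Int) (h : l.all p = true) :
    trailRun p l = l.length := by
  unfold trailRun
  rw [List.takeWhile_eq_self_iff.mpr (by intro x hx; exact (List.all_eq_true.mp h) x (by simpa using hx))]
  simp

theorem trailRun_cons_of_not_all (p : Int → Bool) (t : Int) (u : List Int) (h : u.all p = false) :
    trailRun p (t :: u) = trailRun p u := by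
  unfold trailRun
  rw [List.reverse_cons, takeWhile_append_eq]
  have : u.reverse.all p = false := by simpa using h
  rw [this]
  simp

theorem trailRun_cons_neg (p : Int → Bool) (t : Int) (u : List Int) (h : p t = false) :
    trailRun p (t :: u) = if u.all p then u.length else trailRun p u := by
  unfold trailRun
  rw [List.reverse_cons, takeWhile_append_eq]
  by_cases ha : u.all p = true
  · have : u.reverse.all p = true := by simpa using ha
    rw [this]
    simp [ha, List.takeWhile_cons, h]
  · simp only [Bool.not_eq_true] at ha
    have : u.reverse.all p = false := by simpa using ha
    rw [this, ha]
    simp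

theorem cntAt_zero (p : Int → Bool) (c : Nat) (t : Int) (rest : List Int) :
    cntAt p c (t :: rest) 0 = if p t then c + 1 else 0 := by
  unfold cntAt
  simp only [List.take_succ_cons, List.take_zero]
  by_cases h : p t = true
  · simp [h]
  · simp only [Bool.not_eq_true] at h
    simp [h, trailRun, List.takeWhile_cons]

theorem cntAt_succ (p : Int → Bool) (c : Nat) (t : Int) (rest : List Int) (k : Nat)
    (hk : k < rest.length) :
    cntAt p c (t :: rest) (k+1) = cntAt p (if p t then c + 1 else 0) rest k := by
  unfold cntAt
  simp only [List.take_succ_cons]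
  have hlen : (rest.take (k+1)).length = k + 1 := by
    rw [List.length_take]; omega
  by_cases h : p t = true
  · simp only [h, if_pos]
    by_cases ha : (rest.take (k+1)).all p = true
    · simp [ha, h]; omega
    · simp only [Bool.not_eq_true] at ha
      have hcons : ((t :: rest.take (k+1)).all p) = false := by simp [h, ha]
      rw [hcons, ha]
      simp only [Bool.false_eq_true, if_false]
      exact trailRun_cons_of_not_all p t _ ha
  · simp only [Bool.not_eq_true] at h
    have hcons : ((t :: rest.take (k+1)).all p) = false := by simp [h]
    rw [hcons]
    simp only [Bool.false_eq_true, if_false, h]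
    rw [trailRun_cons_neg p t _ h]
    by_cases ha : (rest.take (k+1)).all p = true
    · rw [if_pos ha, if_pos ha, hlen]; omega
    · simp only [Bool.not_eq_true] at ha
      rw [ha]; simp

theorem le_takeWhile_length_iff (p : Int → Bool) (u : List Int) (m : Nat) :
    m ≤ (u.takeWhile p).length ↔ m ≤ u.length ∧ (u.take m).all p = true := by
  induction u generalizing m with
  | nil => cases m <;> simp
  | cons x xs ih =>
    cases m with
    | zero => simp
    | succ m =>
      by_cases hx : p x = true
      · simp only [List.takeWhile_cons, hx, if_pos, List.length_cons, List.take_succ_cons,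
          List.all_cons, hx, Bool.true_and]
        constructor
        · intro h
          have := (ih m).mp (by omega)
          exact ⟨by omega, this.2⟩
        · rintro ⟨h1, h2⟩
          have := (ih m).mpr ⟨by omega, h2⟩
          omega
      · simp only [Bool.not_eq_true] at hx
        simp [List.takeWhile_cons, hx]

theorem le_trailRun_iff (p : Int → Bool) (l : List Int) (m : Nat) :
    m ≤ trailRun p l ↔ m ≤ l.length ∧ ((l.drop (l.length - m)).all p = true) := by
  unfold trailRun
  rw [le_takeWhile_length_iff]
  rw [List.take_reverse]
  simp

theorem cntAt_zero_credit (p : Int → Bool) (s : List Int) (k : Nat) (hk : k < s.length) :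
    cntAt p 0 s k = trailRun p (s.take (k+1)) := by
  unfold cntAt
  by_cases h : (s.take (k+1)).all p = true
  · rw [if_pos h, trailRun_all p _ h, List.length_take]
    omega
  · simp only [Bool.not_eq_true] at h
    rw [h]; simp

-- the counter reaches 6 at position k exactly when the 6-element window ending at k qualifies
theorem cnt6_iff (p : Int → Bool) (s : List Int) (k : Nat) (hk : k < s.length) :
    6 ≤ cntAt p 0 s k ↔ 5 ≤ k ∧ ((s.drop (k-5)).take 6).all p = true := by
  rw [cntAt_zero_credit p s k hk, le_trailRun_iff]
  have hlen : (s.take (k+1)).length = k + 1 := by rw [List.length_take]; omega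
  rw [hlen]
  constructor
  · rintro ⟨h1, h2⟩
    refine ⟨by omega, ?_⟩
    have : (s.take (k+1)).drop (k+1-6) = (s.drop (k-5)).take 6 := by
      rw [List.drop_take]
      congr 1
      omega
    rw [← this]
    exact h2
  · rintro ⟨h1, h2⟩
    refine ⟨by omega, ?_⟩
    have : (s.take (k+1)).drop (k+1-6) = (s.drop (k-5)).take 6 := by
      rw [List.drop_take]
      congr 1
      omega
    rw [this]
    exact h2

-- CORE: the one-pass counter search equals the window search, indices shifted by 5
theorem core_reindex (p : Int → Bool) (q : Nat → Bool) (s : List Int) :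
    (List.range s.length).find? (fun k => decide (6 ≤ cntAt p 0 s k) && q k)
    = ((List.range (s.length - 5)).find?
        (fun i => ((s.drop i).take 6).all p && q (i + 5))).map (· + 5) := by
  rcases h : (List.range (s.length - 5)).find? (fun i => ((s.drop i).take 6).all p && q (i + 5))
    with _ | i
  · rw [find?_range_eq_none] at h
    simp only [Option.map_none]
    rw [find?_range_eq_none]
    intro m hm
    by_contra hP
    simp only [Bool.and_eq_true, decide_eq_true_eq, Bool.not_eq_false] at hP
    rcases hP with ⟨hc, hq⟩
    rcases (cnt6_iff p s m hm).mp hc with ⟨hm5, hwin⟩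
    have h1 : m - 5 < s.length - 5 := by omega
    have := h (m - 5) h1
    rw [show m - 5 + 5 = m by omega] at this
    simp [hwin, hq] at this
  · rw [find?_range_eq_some] at h
    rcases h with ⟨hi, hP, hmin⟩
    simp only [Bool.and_eq_true] at hP
    simp only [Option.map_some]
    rw [find?_range_eq_some]
    refine ⟨by omega, ?_, ?_⟩
    · have h6 : 6 ≤ cntAt p 0 s (i + 5) := by
        rw [cnt6_iff p s (i+5) (by omega)]
        exact ⟨by omega, by simpa using hP.1⟩
      simp [h6, hP.2]
    · intro m hm
      by_contra hPm
      simp only [Bool.and_eq_true, decide_eq_true_eq, Bool.not_eq_false] at hPm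
      rcases hPm with ⟨hc, hq⟩
      rcases (cnt6_iff p s m (by omega)).mp hc with ⟨hm5, hwin⟩
      have h1 : m - 5 < i := by omega
      have := hmin (m - 5) h1
      rw [show m - 5 + 5 = m by omega] at this
      simp [hwin, hq] at this

-- characterization of B's start scan
theorem startScan_char (s : List Int) : ∀ (j : Int) (c : Nat),
    gslStartScan s j (c : Int)
    = ((List.range s.length).find?
        (fun k => decide (6 ≤ cntAt (fun t => decide (t > 5)) c s k))).map
        (fun k : Nat => j + (k : Int) + 1) := by
  induction s with
  | nil => intro j c; simp [gslStartScan]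
  | cons t rest ih =>
    intro j c
    have hc' : (if t > 5 then (c : Int) + 1 else 0)
        = ((if decide (t > 5) then c + 1 else 0 : Nat) : Int) := by
      by_cases h : t > 5 <;> simp [h]
    rw [gslStartScan, hc']
    set c'' : Nat := if decide (t > 5) then c + 1 else 0 with hc''
    have hzero : cntAt (fun t => decide (t > 5)) c (t :: rest) 0 = c'' := by
      rw [cntAt_zero]
    rw [List.length_cons, List.range_succ_eq_map, List.find?_cons]
    by_cases h6 : 6 ≤ c''
    · have : (6:Int) ≤ (c'' : Int) := by exact_mod_cast h6
      rw [if_pos this]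
      simp [hzero, h6]
    · have : ¬ (6:Int) ≤ (c'' : Int) := by exact_mod_cast h6
      rw [if_neg this]
      have hP0 : decide (6 ≤ cntAt (fun t => decide (t > 5)) c (t :: rest) 0) = false := by
        simp [hzero, h6]
      rw [hP0]
      simp only [Bool.false_eq_true, if_false]
      rw [ih (j+1) c'', List.find?_map]
      have hcongr : (List.range rest.length).find?
            (fun k => decide (6 ≤ cntAt (fun t => decide (t > 5)) c'' rest k))
          = (List.range rest.length).find?
            ((fun k => decide (6 ≤ cntAt (fun t => decide (t > 5)) c (t :: rest) k)) ∘ Nat.succ) := by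
        apply find?_congr'
        intro x hx
        simp only [List.mem_range] at hx
        simp only [Function.comp_apply]
        rw [cntAt_succ _ _ _ _ _ hx]
      rw [hcongr]
      simp only [Option.map_map]
      congr 1
      funext k
      simp only [Function.comp_apply]
      push_cast
      ring
  termination_by s => s.length

-- characterization of B's end scan
theorem endScan_char (n : Int) (s : List Int) : ∀ (j : Int) (c : Nat),
    gslEndScan n s j (c : Int)
    = ((List.range s.length).find?
        (fun k => decide (6 ≤ cntAt (fun t => decide (t < 5)) c s k)
          && decide (j + (k : Int) - 5 > n))).map
        (fun k : Nat => j + (k : Int)) := by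
  induction s with
  | nil => intro j c; simp [gslEndScan]
  | cons t rest ih =>
    intro j c
    have hc' : (if t < 5 then (c : Int) + 1 else 0)
        = ((if decide (t < 5) then c + 1 else 0 : Nat) : Int) := by
      by_cases h : t < 5 <;> simp [h]
    rw [gslEndScan, hc']
    set c'' : Nat := if decide (t < 5) then c + 1 else 0 with hc''
    have hzero : cntAt (fun t => decide (t < 5)) c (t :: rest) 0 = c'' := by
      rw [cntAt_zero]
    rw [List.length_cons, List.range_succ_eq_map, List.find?_cons]
    by_cases hcond : 6 ≤ ((c'' : Nat) : Int) ∧ j - 5 > n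
    · rw [if_pos hcond]
      have h6 : 6 ≤ c'' := by exact_mod_cast hcond.1
      have h2 := hcond.2
      have : (decide (6 ≤ cntAt (fun t => decide (t < 5)) c (t :: rest) 0)
          && decide (j + ((0:Nat) : Int) - 5 > n)) = true := by
        simp only [hzero, Bool.and_eq_true, decide_eq_true_eq]
        exact ⟨h6, by push_cast; omega⟩
      rw [this]
      simp
    · rw [if_neg hcond]
      have hP0 : (decide (6 ≤ cntAt (fun t => decide (t < 5)) c (t :: rest) 0)
          && decide (j + ((0:Nat) : Int) - 5 > n)) = false := by
        rw [hzero]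
        by_cases h6 : 6 ≤ c''
        · have : ¬ (j - 5 > n) := fun hq => hcond ⟨by exact_mod_cast h6, hq⟩
          simp [this]
        · simp [h6]
      rw [hP0]
      simp only [Bool.false_eq_true, if_false]
      rw [ih (j+1) c'', List.find?_map]
      have hcongr : (List.range rest.length).find?
            (fun k => decide (6 ≤ cntAt (fun t => decide (t < 5)) c'' rest k)
              && decide ((j+1) + (k : Int) - 5 > n))
          = (List.range rest.length).find?
            ((fun k => decide (6 ≤ cntAt (fun t => decide (t < 5)) c (t :: rest) k)
              && decide (j + (k : Int) - 5 > n)) ∘ Nat.succ) := by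
        apply find?_congr'
        intro x hx
        simp only [List.mem_range] at hx
        simp only [Function.comp_apply]
        rw [cntAt_succ _ _ _ _ _ hx]
        congr 1
        apply decide_eq_decide.mpr
        constructor <;> intro h <;> [skip; skip] <;> push_cast at * <;> omega
      rw [hcongr]
      simp only [Option.map_map]
      congr 1
      funext k
      simp only [Function.comp_apply]
      push_cast
      ring
  termination_by s => s.length

-- A's break-loop over a Python range, as a find? over List.range
theorem foldl_pyRange_break (m : Int) (P : Int → Bool) (g : Int → Int) :
    (PySem.List.pyRange 0 m 1).foldl (breakStep P g) none
    = ((List.range m.toNat).find? (fun k : Nat => P (k : Int))).map (fun k : Nat => g (k : Int)) := by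
  rw [PySem.List.pyRange_one, foldl_break, List.find?_map]
  simp only [Option.map_map, sub_zero]
  congr 1
  · funext k
    simp
  · apply find?_congr'
    intro k _
    simp

-- main equivalence
theorem gsl_eq (nums : List Int) (n : Int) :
    growing_season_length nums n = growing_season_length_alt nums n := by
  have htoNat : ((nums.length : Int) - 5).toNat = nums.length - 5 := by omega
  -- phase 1, A side
  have hA1 : (PySem.List.pyRange 0 ((nums.length : Int) - 5) 1).foldl
      (breakStep (fun i => (PySem.List.slice nums (some i) (some (i + 6))).all (fun m => decide (m > 5)))
        (fun i => i + 6)) none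
      = ((List.range (nums.length - 5)).find?
          (fun k : Nat => ((nums.drop k).take 6).all (fun m => decide (m > 5)))).map
          (fun k : Nat => (k : Int) + 6) := by
    rw [foldl_pyRange_break ((nums.length : Int) - 5)
      (fun i => (PySem.List.slice nums (some i) (some (i + 6))).all (fun m => decide (m > 5)))
      (fun i => i + 6), htoNat]
    congr 1
    apply find?_congr'
    intro k _
    have h6 : (k : Int) + 6 = ((k + 6 : Nat) : Int) := by push_cast; ring
    rw [h6, PySem.List.slice_natCast, show k + 6 - k = 6 from by omega]
  -- phase 1, B side
  have hB1 : gslStartScan nums 0 0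
      = ((List.range (nums.length - 5)).find?
          (fun k : Nat => ((nums.drop k).take 6).all (fun m => decide (m > 5)))).map
          (fun k : Nat => (k : Int) + 6) := by
    rw [show gslStartScan nums 0 0 = gslStartScan nums 0 ((0 : Nat) : Int) from rfl,
      startScan_char nums 0 0]
    have hq : (fun k : Nat => decide (6 ≤ cntAt (fun t => decide (t > 5)) 0 nums k))
        = (fun k : Nat => decide (6 ≤ cntAt (fun t => decide (t > 5)) 0 nums k) && (fun _ : Nat => true) k) := by
      funext k; simp
    rw [hq, core_reindex (fun t => decide (t > 5)) (fun _ : Nat => true) nums]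
    simp only [Bool.and_true, Option.map_map]
    congr 1
    funext k
    simp only [Function.comp_apply]
    push_cast
    ring
  unfold growing_season_length growing_season_length_alt
  simp only []
  rw [hA1, ← hB1]
  rcases hs : gslStartScan nums 0 0 with _ | s
  · rfl
  · dsimp only
    -- phase 2; first find the window index behind s
    rw [hB1] at hs
    rcases hw : (List.range (nums.length - 5)).find?
        (fun k : Nat => ((nums.drop k).take 6).all (fun m => decide (m > 5))) with _ | i
    · rw [hw] at hs; cases hs
    · rw [hw] at hs
      simp only [Option.map_some] at hs
      injection hs with hs
      have hiN : i < nums.length - 5 := ((find?_range_eq_some _ _ i).mp hw).1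
      -- the tail slice and the second range bound
      have hsval : s = ((i + 6 : Nat) : Int) := by push_cast; omega
      have htail : PySem.List.slice nums (some s) none = nums.drop (i + 6) := by
        rw [hsval, PySem.List.slice_from_natCast]
      have hbound : s + ((PySem.List.slice nums (some s) none).length : Int) - 5
          = (nums.length : Int) - 5 := by
        rw [htail, List.length_drop, hsval]
        push_cast
        omega
      rw [hbound]
      -- phase 2, A side
      have hA2 : (PySem.List.pyRange 0 ((nums.length : Int) - 5) 1).foldl
          (breakStep (fun i => (PySem.List.slice nums (some i) (some (i + 6))).all (fun m => decide (m < 5))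
              && decide (i > n))
            (fun i => i + 5)) none
          = ((List.range (nums.length - 5)).find?
              (fun k : Nat => ((nums.drop k).take 6).all (fun m => decide (m < 5))
                && decide ((k : Int) > n))).map
              (fun k : Nat => (k : Int) + 5) := by
        rw [foldl_pyRange_break ((nums.length : Int) - 5)
          (fun i => (PySem.List.slice nums (some i) (some (i + 6))).all (fun m => decide (m < 5))
            && decide (i > n))
          (fun i => i + 5), htoNat]
        congr 1
        apply find?_congr'
        intro k _
        have h6 : (k : Int) + 6 = ((k + 6 : Nat) : Int) := by push_cast; ring
        rw [h6, PySem.List.slice_natCast, show k + 6 - k = 6 from by omega]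
      -- phase 2, B side
      have hB2 : gslEndScan n nums 0 0
          = ((List.range (nums.length - 5)).find?
              (fun k : Nat => ((nums.drop k).take 6).all (fun m => decide (m < 5))
                && decide ((k : Int) > n))).map
              (fun k : Nat => (k : Int) + 5) := by
        rw [show gslEndScan n nums 0 0 = gslEndScan n nums 0 ((0 : Nat) : Int) from rfl,
          endScan_char n nums 0 0,
          core_reindex (fun t => decide (t < 5)) (fun k : Nat => decide ((0:Int) + (k : Int) - 5 > n)) nums]
        have hcongr : (List.range (nums.length - 5)).find?
              (fun k : Nat => ((nums.drop k).take 6).all (fun m => decide (m < 5))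
                && decide ((0:Int) + ((k + 5 : Nat) : Int) - 5 > n))
            = (List.range (nums.length - 5)).find?
              (fun k : Nat => ((nums.drop k).take 6).all (fun m => decide (m < 5))
                && decide ((k : Int) > n)) := by
          apply find?_congr'
          intro x _
          congr 1
          apply decide_eq_decide.mpr
          push_cast
          omega
        rw [hcongr]
        simp only [Option.map_map]
        congr 1
        funext k
        simp only [Function.comp_apply]
        push_cast
        ring
      rw [hA2, ← hB2]

-- ===== VERDICT (by name: the statement is the Claim_ definition above) =====
theorem growing_season_length_spec : Claim_equal_growing_season_length := by
  intro nums n _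
  unfold Spec_growing_season_length
  exact gsl_eq nums n
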